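-- pv_equiv track=rewrite | github.com/Medjed-maker/proteus | src/phonology/search/_overlap.py | _collect_fragment_matches
-- ===== SOURCE A (Python) =====
-- from collections.abc import Iterable, Sequence
--
-- def _contiguous_prefix_match_length(
--     fragment_tokens: Sequence[str],
--     lemma_tokens: Sequence[str],
--     start_index: int,
-- ) -> int:
--     """Return the contiguous prefix match length from one lemma offset."""
--     if start_index < 0:
--         return 0
--     if start_index >= len(lemma_tokens):
--         return 0
--
--     overlap = 0
--     max_length = min(len(fragment_tokens), len(lemma_tokens) - start_index)
--     while (
--         overlap < max_length
--         and fragment_tokens[overlap] == lemma_tokens[start_index + overlap]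
--     ):
--         overlap += 1
--     return overlap
--
-- def _collect_fragment_matches(
--     fragment_tokens: Sequence[str],
--     lemma_tokens: Sequence[str],
-- ) -> list[tuple[int, int]]:
--     """Return every (start_index, overlap_length) pair with overlap > 0.
--
--     Used by the infix branch of :func:`_match_partial_query` to find all
--     candidate match offsets for each fragment in a single pass, so the
--     downstream pair-matching loop can rely on a compact match list
--     instead of re-scanning the whole lemma.
--     """
--     if not fragment_tokens:
--         return []
--     matches: list[tuple[int, int]] = []
--     for start in range(len(lemma_tokens)):
--         overlap = _contiguous_prefix_match_length(fragment_tokens, lemma_tokens, start)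
--         if overlap > 0:
--             matches.append((start, overlap))
--     return matches
-- ===== SOURCE B (Python) =====
-- def _z_array(s):
--     """Z-array: z[i] = length of the longest common prefix of s and s[i:]."""
--     n = len(s)
--     z = [0] * n
--     l = r = 0
--     for i in range(1, n):
--         if i < r:
--             z[i] = min(r - i, z[i - l])
--         while i + z[i] < n and s[z[i]] == s[i + z[i]]:
--             z[i] += 1
--         if i + z[i] > r:
--             l, r = i, i + z[i]
--     return z
--
--
-- def _collect_fragment_matches(fragment_tokens, lemma_tokens):
--     """Return every (start_index, overlap_length) pair with overlap > 0.
--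
--     Z-algorithm re-implementation: concatenate fragment + [sentinel] + lemma
--     and compute the Z-array once in O(n + m); z[off + i] is then exactly the
--     contiguous prefix overlap of the fragment at lemma offset i (the sentinel
--     caps it at len(fragment)), so one linear read-out yields all matches.
--     """
--     if not fragment_tokens:
--         return []
--     sep = object()
--     s = list(fragment_tokens) + [sep] + list(lemma_tokens)
--     z = _z_array(s)
--     off = len(fragment_tokens) + 1
--     matches = []
--     for i in range(len(lemma_tokens)):
--         overlap = z[off + i]
--         if overlap > 0:
--             matches.append((i, overlap))
--     return matches
-- ===== Notes on version B (the rewrite author's own statement) =====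
-- stated objective: faster
-- what changed: Replaces A's per-offset rescan (a bounded while loop restarted at every lemma offset) by the Z-algorithm on fragment + [sentinel] + lemma, which computes all prefix-overlap lengths in one linear pass and reads the matches off the Z-array.
import Mathlib
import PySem

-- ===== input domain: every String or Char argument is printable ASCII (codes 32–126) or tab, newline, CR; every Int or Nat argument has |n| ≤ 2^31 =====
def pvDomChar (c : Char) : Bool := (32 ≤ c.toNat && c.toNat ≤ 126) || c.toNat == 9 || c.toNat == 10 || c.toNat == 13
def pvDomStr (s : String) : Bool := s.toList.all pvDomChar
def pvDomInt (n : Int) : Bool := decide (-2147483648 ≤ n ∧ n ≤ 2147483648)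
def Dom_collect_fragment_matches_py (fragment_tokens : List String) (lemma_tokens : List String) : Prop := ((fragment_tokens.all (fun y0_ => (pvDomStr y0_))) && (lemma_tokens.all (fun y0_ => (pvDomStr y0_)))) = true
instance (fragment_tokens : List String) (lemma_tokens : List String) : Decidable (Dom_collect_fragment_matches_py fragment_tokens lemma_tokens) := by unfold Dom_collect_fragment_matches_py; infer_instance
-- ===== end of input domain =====

-- B replaces A's per-offset rescans by the Z-algorithm on fragment ++ [sentinel] ++ lemma:
-- one linear pass computes all prefix-overlap lengths (O(n+m) instead of O(n*m)).

-- ===== PORT A =====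
-- while loop of _contiguous_prefix_match_length; exact: the guard overlap < maxLen keeps both indices in range,
-- so comparing the pyGet? options equals Python's element comparison
def pvCPMLoop (frag lem : List String) (start maxLen overlap : Int) : Int :=
  if h : overlap < maxLen ∧ PySem.List.pyGet? frag overlap = PySem.List.pyGet? lem (start + overlap)
  then pvCPMLoop frag lem start maxLen (overlap + 1)
  else overlap
termination_by (maxLen - overlap).toNat
decreasing_by omega

def contiguous_prefix_match_length_py (frag lem : List String) (start : Int) : Int :=
  if start < 0 then 0
  else if start ≥ (lem.length : Int) then 0
  else pvCPMLoop frag lem start (min (frag.length : Int) ((lem.length : Int) - start)) 0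

def collect_fragment_matches_py (fragment_tokens : List String) (lemma_tokens : List String) : List (Int × Int) :=
  if fragment_tokens = [] then []
  else
    (PySem.List.pyRange 0 (lemma_tokens.length : Int) 1).foldl
      (fun acc start =>
        let overlap := contiguous_prefix_match_length_py fragment_tokens lemma_tokens start
        if overlap > 0 then acc ++ [(start, overlap)] else acc)
      []

-- ===== PORT B =====
-- Python's fresh `object()` sentinel, equal to no token, is `none` over `Option String`.
-- the Z-algorithm while loop: `while i + z[i] < n and s[z[i]] == s[i + z[i]]: z[i] += 1`;
-- exact: inside the guard both indices are in range, so getElem? equality is Python's element equality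
def pvZWhile (s : List (Option String)) (i : Nat) (zi : Nat) : Nat :=
  if h : i + zi < s.length ∧ s[zi]? = s[i + zi]? then pvZWhile s i (zi + 1) else zi
termination_by s.length - (i + zi)
decreasing_by omega

-- the `for i in range(1, n)` loop of _z_array, carrying (z, l, r)
def pvZRec (s : List (Option String)) (n i : Nat) (z : List Nat) (l r : Nat) : List Nat :=
  if _h : i < n then
    let z0 := if i < r then min (r - i) (z[i - l]!) else z[i]!
    let zi := pvZWhile s i z0
    let z' := z.set i zi
    if i + zi > r then pvZRec s n (i + 1) z' i (i + zi)
    else pvZRec s n (i + 1) z' l r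
  else z
termination_by n - i

def pvZArray (s : List (Option String)) : List Nat :=
  pvZRec s s.length 1 (List.replicate s.length 0) 0 0

def collect_fragment_matches_py_alt (fragment_tokens : List String) (lemma_tokens : List String) : List (Int × Int) :=
  if fragment_tokens = [] then []
  else
    let s := fragment_tokens.map some ++ [none] ++ lemma_tokens.map some
    let z := pvZArray s
    let off := fragment_tokens.length + 1
    (List.range lemma_tokens.length).foldl
      (fun acc i =>
        let overlap := z[off + i]!
        if overlap > 0 then acc ++ [((i : Int), (overlap : Int))] else acc)
      []

-- ===== PRECONDITION & SPEC =====
def Spec_collect_fragment_matches_py (fragment_tokens : List String) (lemma_tokens : List String) (out : List (Int × Int)) : Prop := out = collect_fragment_matches_py_alt fragment_tokens lemma_tokens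
instance (fragment_tokens : List String) (lemma_tokens : List String) (out : List (Int × Int)) : Decidable (Spec_collect_fragment_matches_py fragment_tokens lemma_tokens out) := by unfold Spec_collect_fragment_matches_py; infer_instance

-- ===== CLAIM (what is proved, stated in full; the proofs are below) =====
def Claim_equal_collect_fragment_matches_py : Prop := ∀ (fragment_tokens : List String) (lemma_tokens : List String), Dom_collect_fragment_matches_py fragment_tokens lemma_tokens → Spec_collect_fragment_matches_py fragment_tokens lemma_tokens (collect_fragment_matches_py fragment_tokens lemma_tokens)

-- ===== LEMMAS AND PROOFS =====

-- pairwise longest-common-prefix length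
def pvLcpN {α : Type} [DecidableEq α] : List α → List α → Nat
  | x :: xs, y :: ys => if x = y then pvLcpN xs ys + 1 else 0
  | _, _ => 0

-- the true Z-value of s at offset i
def pvZf (s : List (Option String)) (i : Nat) : Nat := pvLcpN s (s.drop i)

lemma pvLcpN_nil_right {α : Type} [DecidableEq α] (xs : List α) : pvLcpN xs [] = 0 := by
  cases xs <;> rfl

lemma pvLcpN_le_right {α : Type} [DecidableEq α] (xs ys : List α) : pvLcpN xs ys ≤ ys.length := by
  induction xs generalizing ys with
  | nil => simp [pvLcpN]
  | cons x xs ih =>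
    cases ys with
    | nil => simp [pvLcpN]
    | cons y ys =>
      simp only [pvLcpN]
      split
      · have := ih ys; simp only [List.length_cons]; omega
      · omega

lemma pvLcpN_agree {α : Type} [DecidableEq α] (xs ys : List α) (t : Nat)
    (ht : t < pvLcpN xs ys) : xs[t]? = ys[t]? := by
  induction xs generalizing ys t with
  | nil => simp [pvLcpN] at ht
  | cons x xs ih =>
    cases ys with
    | nil => simp [pvLcpN] at ht
    | cons y ys =>
      simp only [pvLcpN] at ht
      by_cases h : x = y
      · rw [if_pos h] at ht
        cases t with
        | zero => simp [h]
        | succ t => simpa using ih ys t (by omega)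
      · rw [if_neg h] at ht; omega

lemma pvLcpN_split {α : Type} [DecidableEq α] (k : Nat) :
    ∀ (xs ys : List α), k ≤ xs.length → k ≤ ys.length →
      (∀ t, t < k → xs[t]? = ys[t]?) →
      pvLcpN xs ys = k + pvLcpN (xs.drop k) (ys.drop k) := by
  induction k with
  | zero => intro xs ys _ _ _; simp
  | succ k ih =>
    intro xs ys hx hy hag
    cases xs with
    | nil => simp at hx
    | cons x xs =>
      cases ys with
      | nil => simp at hy
      | cons y ys =>
        have h0 := hag 0 (by omega)
        simp at h0
        simp only [pvLcpN, if_pos h0, List.drop_succ_cons]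
        rw [ih xs ys (by simpa using hx) (by simpa using hy)
            (fun t ht => by simpa using hag (t + 1) (by omega))]
        omega

-- the while loop, from any start value, adds the lcp of the two remaining suffixes
lemma pvZWhile_eq (s : List (Option String)) (i : Nat) :
    ∀ (fuel k : Nat), s.length - (i + k) ≤ fuel →
      pvZWhile s i k = k + pvLcpN (s.drop k) (s.drop (i + k)) := by
  intro fuel
  induction fuel with
  | zero =>
    intro k hk
    have hik : s.length ≤ i + k := by omega
    rw [pvZWhile, dif_neg (by omega)]
    rw [List.drop_eq_nil_of_le hik, pvLcpN_nil_right]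
    omega
  | succ fuel ih =>
    intro k hk
    rw [pvZWhile]
    by_cases hin : i + k < s.length
    · have hks : k < s.length := by omega
      have hdf : s.drop k = s[k] :: s.drop (k + 1) := List.drop_eq_getElem_cons hks
      have hdl : s.drop (i + k) = s[i + k] :: s.drop (i + k + 1) := List.drop_eq_getElem_cons hin
      by_cases heq : s[k] = s[i + k]
      · rw [dif_pos ⟨hin, by rw [List.getElem?_eq_getElem hks, List.getElem?_eq_getElem hin, heq]⟩]
        rw [ih (k + 1) (by omega), hdf, hdl]
        simp only [pvLcpN, if_pos heq]
        have h2 : i + (k + 1) = i + k + 1 := by omega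
        rw [h2]
        omega
      · rw [dif_neg (by
          rintro ⟨_, hc⟩
          rw [List.getElem?_eq_getElem hks, List.getElem?_eq_getElem hin] at hc
          exact heq (Option.some.inj hc))]
        rw [hdf, hdl]
        simp only [pvLcpN, if_neg heq]
        omega
    · rw [dif_neg (by rintro ⟨h, _⟩; omega)]
      rw [show List.drop (i + k) s = ([] : List (Option String)) from List.drop_eq_nil_of_le (by omega),
        pvLcpN_nil_right]
      omega

-- the main Z loop: every processed entry holds the true Z-value
lemma set_get! (z : List Nat) (i v j : Nat) (hj : j < z.length) :
    (z.set i v)[j]! = if i = j then v else z[j]! := by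
  rw [List.getElem!_eq_getElem?_getD, List.getElem?_set, List.getElem!_eq_getElem?_getD]
  by_cases h : i = j
  · rw [if_pos h, if_pos h, if_pos (by omega)]
    rfl
  · rw [if_neg h, if_neg h]

lemma pvZRec_correct (s : List (Option String)) :
    ∀ (fuel i : Nat) (z : List Nat) (l r : Nat), s.length - i ≤ fuel →
      1 ≤ i → z.length = s.length →
      (∀ j, 1 ≤ j → j < i → z[j]! = pvZf s j) →
      (∀ j, i ≤ j → j < z.length → z[j]! = 0) →
      l < i → r ≤ l + pvZf s l → (0 < r → 1 ≤ l) →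
      ∀ j, 1 ≤ j → j < s.length →
        (pvZRec s s.length i z l r)[j]! = pvZf s j := by
  intro fuel
  induction fuel with
  | zero =>
    intro i z l r hfuel h1 hlen hz1 hz0 hl hr hrl j hj1 hj2
    rw [pvZRec, dif_neg (by omega)]
    exact hz1 j hj1 (by omega)
  | succ fuel ih =>
    intro i z l r hfuel h1 hlen hz1 hz0 hl hr hrl j hj1 hj2
    by_cases hi : i < s.length
    case neg =>
      rw [pvZRec, dif_neg hi]
      exact hz1 j hj1 (by omega)
    case pos =>
    have hzfl : pvZf s l ≤ s.length - l := by
      have h := pvLcpN_le_right s (s.drop l)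
      simpa [pvZf] using h
    have hags : (∀ t, t < (if i < r then min (r - i) (z[i - l]!) else z[i]!) → s[t]? = s[i + t]?)
        ∧ (if i < r then min (r - i) (z[i - l]!) else z[i]!) ≤ s.length - i := by
      by_cases hir : i < r
      · have hl1 : 1 ≤ l := hrl (by omega)
        have hil : z[i - l]! = pvZf s (i - l) := hz1 (i - l) (by omega) (by omega)
        rw [if_pos hir, hil]
        constructor
        · intro t ht
          have ht1 : t < pvZf s (i - l) := by omega
          have ht2 : i + t < r := by omega
          have e1 : s[t]? = s[(i - l) + t]? := by
            have := pvLcpN_agree s (s.drop (i - l)) t ht1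
            rwa [List.getElem?_drop] at this
          have e2 : s[(i - l) + t]? = s[i + t]? := by
            have hu : (i - l) + t < pvZf s l := by omega
            have := pvLcpN_agree s (s.drop l) ((i - l) + t) hu
            rw [List.getElem?_drop] at this
            rw [this]
            congr 1
            omega
          rw [e1, e2]
        · omega
      · rw [if_neg hir, hz0 i (le_refl i) (by omega)]
        exact ⟨fun t ht => absurd ht (by omega), by omega⟩
    have hzi : pvZWhile s i (if i < r then min (r - i) (z[i - l]!) else z[i]!) = pvZf s i := by
      set z0 := (if i < r then min (r - i) (z[i - l]!) else z[i]!) with hdef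
      rw [pvZWhile_eq s i s.length z0 (by omega)]
      have hsplit := pvLcpN_split z0 s (s.drop i) (by omega) (by simp; omega)
        (fun t ht => by rw [List.getElem?_drop]; exact hags.1 t ht)
      unfold pvZf
      rw [hsplit, List.drop_drop]
    rw [pvZRec, dif_pos hi]
    simp only [hzi]
    have hlen' : (z.set i (pvZf s i)).length = s.length := by simpa using hlen
    have hz1' : ∀ j, 1 ≤ j → j < i + 1 → (z.set i (pvZf s i))[j]! = pvZf s j := by
      intro j hj hji
      rw [set_get! z i _ j (by omega)]
      by_cases h : i = j
      · rw [if_pos h, h]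
      · rw [if_neg h]; exact hz1 j hj (by omega)
    have hz0' : ∀ j, i + 1 ≤ j → j < (z.set i (pvZf s i)).length → (z.set i (pvZf s i))[j]! = 0 := by
      intro j hj hjl
      rw [set_get! z i _ j (by simpa using hjl)]
      rw [if_neg (by omega)]
      exact hz0 j (by omega) (by simpa using hjl)
    by_cases hbr : i + pvZf s i > r
    · rw [if_pos hbr]
      exact ih (i + 1) (z.set i (pvZf s i)) i (i + pvZf s i) (by omega) (by omega) hlen' hz1' hz0'
        (by omega) (by omega) (by omega) j hj1 hj2
    · rw [if_neg hbr]
      exact ih (i + 1) (z.set i (pvZf s i)) l r (by omega) (by omega) hlen' hz1' hz0'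
        (by omega) hr hrl j hj1 hj2

lemma pvZArray_correct (s : List (Option String)) (j : Nat) (h1 : 1 ≤ j) (h2 : j < s.length) :
    (pvZArray s)[j]! = pvZf s j := by
  unfold pvZArray
  exact pvZRec_correct s s.length 1 (List.replicate s.length 0) 0 0 (by omega) (le_refl 1)
    (by simp) (fun j hj1 hj2 => by omega)
    (fun j _ hj => by
      rw [List.getElem!_eq_getElem?_getD, List.getElem?_replicate]
      simp at hj
      rw [if_pos hj]
      rfl)
    (by omega) (by omega) (by omega) j h1 h2

-- the sentinel caps the Z-value: lcp over the concatenation is the plain token lcp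
lemma sep_lcp (frag : List String) (junk : List (Option String)) :
    ∀ (xs : List String),
      pvLcpN (frag.map some ++ none :: junk) (xs.map some) = pvLcpN frag xs := by
  induction frag with
  | nil =>
    intro xs
    cases xs with
    | nil => simp [pvLcpN, pvLcpN_nil_right]
    | cons x xs => simp [pvLcpN]
  | cons f fs ih =>
    intro xs
    cases xs with
    | nil => simp [pvLcpN_nil_right]
    | cons x xs =>
      simp only [List.map_cons, List.cons_append, pvLcpN, Option.some.injEq]
      rw [ih xs]

-- reference form: structural recursion over lemma suffixes
def pvRef (first : String) (tail : List String) : List String → Int → List (Int × Int)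
  | [], _ => []
  | y :: ys, i => (if y = first then [(i, 1 + (pvLcpN tail ys : Int))] else []) ++ pvRef first tail ys (i + 1)

-- ===== A-side characterisation =====
-- A's inner while loop computes overlap + lcp of the two suffixes
lemma loop_eq (frag lem : List String) (j : Nat) :
    ∀ (n k : Nat), frag.length - k ≤ n →
      pvCPMLoop frag lem (j : Int) (min (frag.length : Int) ((lem.length : Int) - (j : Int))) (k : Int)
        = (k : Int) + (pvLcpN (frag.drop k) (lem.drop (j + k)) : Int) := by
  intro n
  induction n with
  | zero =>
    intro k hk
    have hkf : frag.length ≤ k := by omega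
    rw [pvCPMLoop]
    rw [dif_neg (by omega)]
    rw [List.drop_eq_nil_of_le hkf]
    simp [pvLcpN]
  | succ n ih =>
    intro k hk
    rw [pvCPMLoop]
    by_cases hlt : (k : Int) < min (frag.length : Int) ((lem.length : Int) - (j : Int))
    · have hkf : k < frag.length := by omega
      have hkl : j + k < lem.length := by omega
      have hgf : PySem.List.pyGet? frag (k : Int) = some (frag[k]) := by
        rw [PySem.List.pyGet?_natCast]; exact List.getElem?_eq_getElem hkf
      have hgl : PySem.List.pyGet? lem ((j : Int) + (k : Int)) = some (lem[j + k]) := by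
        have : (j : Int) + (k : Int) = ((j + k : Nat) : Int) := by omega
        rw [this, PySem.List.pyGet?_natCast]; exact List.getElem?_eq_getElem hkl
      have hdf : frag.drop k = frag[k] :: frag.drop (k + 1) := List.drop_eq_getElem_cons hkf
      have hdl : lem.drop (j + k) = lem[j + k] :: lem.drop (j + k + 1) := List.drop_eq_getElem_cons hkl
      by_cases heq : frag[k] = lem[j + k]
      · rw [dif_pos ⟨hlt, by rw [hgf, hgl, heq]⟩]
        have : (k : Int) + 1 = ((k + 1 : Nat) : Int) := by push_cast; ring
        rw [this, ih (k + 1) (by omega)]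
        rw [hdf, hdl]
        simp only [pvLcpN, if_pos heq]
        have h2 : j + (k + 1) = j + k + 1 := by omega
        rw [h2]
        push_cast
        ring
      · rw [dif_neg (by
          intro hc
          rcases hc with ⟨_, hc⟩
          rw [hgf, hgl] at hc
          exact heq (Option.some.inj hc))]
        rw [hdf, hdl]
        simp only [pvLcpN, if_neg heq]
        simp
    · rw [dif_neg (by intro hc; exact hlt hc.1)]
      have : frag.length ≤ k ∨ lem.length ≤ j + k := by omega
      rcases this with h | h
      · rw [List.drop_eq_nil_of_le h]
        simp [pvLcpN]
      · rw [List.drop_eq_nil_of_le h, pvLcpN_nil_right]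
        simp

-- the helper, pointwise, at an in-range offset
lemma cpml_eq (frag lem : List String) (i : Nat) (hi : i < lem.length) :
    contiguous_prefix_match_length_py frag lem (i : Int) = (pvLcpN frag (lem.drop i) : Int) := by
  unfold contiguous_prefix_match_length_py
  rw [if_neg (by omega), if_neg (by omega)]
  have h0 : ((0 : Nat) : Int) = (0 : Int) := rfl
  rw [← h0, loop_eq frag lem i frag.length 0 (by omega)]
  simp

lemma a_eq_ref (first : String) (tail lem : List String) :
    ∀ (ys : List String) (i : Nat), ys = lem.drop i →
      ((PySem.List.pyRange (i : Int) (lem.length : Int) 1).filter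
          (fun s => decide (contiguous_prefix_match_length_py (first :: tail) lem s > 0))).map
          (fun s => (s, contiguous_prefix_match_length_py (first :: tail) lem s))
        = pvRef first tail ys (i : Int) := by
  intro ys
  induction ys with
  | nil =>
    intro i hdrop
    have : lem.length ≤ i := List.drop_eq_nil_iff.mp hdrop.symm
    rw [PySem.List.pyRange_one_eq_nil (by omega)]
    simp [pvRef]
  | cons y ys' ih =>
    intro i hdrop
    have hlen := congrArg List.length hdrop
    simp only [List.length_cons, List.length_drop] at hlen
    have hi : i < lem.length := by omega
    have hys' : ys' = lem.drop (i + 1) := by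
      have := List.drop_eq_getElem_cons hi
      rw [← hdrop] at this
      exact (List.cons.inj this).2
    have hcpml : contiguous_prefix_match_length_py (first :: tail) lem (i : Int)
        = if y = first then (pvLcpN tail ys' : Int) + 1 else 0 := by
      rw [cpml_eq _ lem i hi, ← hdrop]
      simp only [pvLcpN]
      by_cases h : y = first
      · rw [if_pos (by rw [h]), if_pos h]
        push_cast
        ring
      · rw [if_neg (by intro hc; exact h hc.symm), if_neg h]
        rfl
    rw [PySem.List.pyRange_one_cons (by omega)]
    have hcast : (i : Int) + 1 = ((i + 1 : Nat) : Int) := by push_cast; ring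
    by_cases hyf : y = first
    · have hpos : contiguous_prefix_match_length_py (first :: tail) lem (i : Int) > 0 := by
        rw [hcpml, if_pos hyf]
        positivity
      rw [List.filter_cons_of_pos (by simpa using hpos)]
      rw [List.map_cons, hcast, ih (i + 1) hys']
      simp only [pvRef, if_pos hyf, List.singleton_append]
      rw [hcpml, if_pos hyf, hcast]
      congr 2
      ring
    · have hzero : contiguous_prefix_match_length_py (first :: tail) lem (i : Int) = 0 := by
        rw [hcpml, if_neg hyf]
      rw [List.filter_cons_of_neg (by simp [hzero])]
      rw [hcast, ih (i + 1) hys']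
      simp only [pvRef, if_neg hyf, List.nil_append]
      rw [hcast]

-- ===== B-side characterisation =====
-- the Z-array entry at offset off+i is the plain lcp of the fragment with the lemma suffix
lemma zval_eq (first : String) (tail lem : List String) (i : Nat) (hi : i < lem.length) :
    (pvZArray ((first :: tail).map some ++ [none] ++ lem.map some))[(first :: tail).length + 1 + i]!
      = pvLcpN (first :: tail) (lem.drop i) := by
  set s := (first :: tail).map some ++ [none] ++ lem.map some with hs
  have hslen : s.length = (first :: tail).length + 1 + lem.length := by
    simp [hs]
    omega
  rw [pvZArray_correct s ((first :: tail).length + 1 + i) (by omega) (by omega)]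
  unfold pvZf
  have hdrop : s.drop ((first :: tail).length + 1 + i) = (lem.drop i).map some := by
    have h1 : s = ((first :: tail).map some ++ [none]) ++ lem.map some := by simp [hs]
    have h2 : ((first :: tail).map some ++ [none]).length = (first :: tail).length + 1 := by simp
    rw [h1, List.drop_append]
    rw [List.drop_eq_nil_of_le (by rw [h2]; omega), List.nil_append]
    rw [h2, show (first :: tail).length + 1 + i - ((first :: tail).length + 1) = i by omega]
    exact (List.map_drop ..).symm
  rw [hdrop]
  have h1 : s = (first :: tail).map some ++ none :: (lem.map some) := by simp [hs]
  rw [h1, sep_lcp]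

lemma b_eq_ref (first : String) (tail lem : List String) :
    ∀ (ys : List String) (i : Nat), ys = lem.drop i →
      ((List.range' i (lem.length - i)).filter
          (fun j : Nat => decide ((pvZArray ((first :: tail).map some ++ [none] ++ lem.map some))[(first :: tail).length + 1 + j]! > 0))).map
          (fun j : Nat => ((j : Int), ((pvZArray ((first :: tail).map some ++ [none] ++ lem.map some))[(first :: tail).length + 1 + j]! : Int)))
        = pvRef first tail ys (i : Int) := by
  intro ys
  induction ys with
  | nil =>
    intro i hdrop
    have : lem.length ≤ i := List.drop_eq_nil_iff.mp hdrop.symm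
    rw [show lem.length - i = 0 by omega]
    simp [pvRef]
  | cons y ys' ih =>
    intro i hdrop
    have hlen := congrArg List.length hdrop
    simp only [List.length_cons, List.length_drop] at hlen
    have hi : i < lem.length := by omega
    have hys' : ys' = lem.drop (i + 1) := by
      have := List.drop_eq_getElem_cons hi
      rw [← hdrop] at this
      exact (List.cons.inj this).2
    have hz : (pvZArray ((first :: tail).map some ++ [none] ++ lem.map some))[(first :: tail).length + 1 + i]!
        = if y = first then pvLcpN tail ys' + 1 else 0 := by
      rw [zval_eq first tail lem i hi, ← hdrop]
      simp only [pvLcpN]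
      by_cases h : y = first
      · rw [if_pos (by rw [h]), if_pos h]
      · rw [if_neg (by intro hc; exact h hc.symm), if_neg h]
    rw [show lem.length - i = (lem.length - (i + 1)) + 1 by omega, List.range'_succ]
    by_cases hyf : y = first
    · rw [List.filter_cons_of_pos (by simp only [hz, if_pos hyf, decide_eq_true_eq]; omega)]
      rw [List.map_cons, ih (i + 1) hys']
      simp only [pvRef, if_pos hyf, List.singleton_append]
      rw [hz, if_pos hyf]
      push_cast
      ring_nf
    · rw [List.filter_cons_of_neg (by simp only [hz, if_neg hyf, decide_eq_true_eq]; omega)]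
      rw [ih (i + 1) hys']
      simp only [pvRef, if_neg hyf, List.nil_append]
      push_cast
      ring_nf

-- ===== VERDICT (by name: the statement is the Claim_ definition above) =====
theorem collect_fragment_matches_py_spec : Claim_equal_collect_fragment_matches_py := by
  intro frag lem _
  unfold Spec_collect_fragment_matches_py
  cases frag with
  | nil => simp [collect_fragment_matches_py, collect_fragment_matches_py_alt]
  | cons first tail =>
    have hA : collect_fragment_matches_py (first :: tail) lem = pvRef first tail lem 0 := by
      unfold collect_fragment_matches_py
      rw [if_neg (List.cons_ne_nil first tail)]
      show List.foldl
          (fun acc start =>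
            if contiguous_prefix_match_length_py (first :: tail) lem start > 0 then
              acc ++ [(start, contiguous_prefix_match_length_py (first :: tail) lem start)]
            else acc)
          [] (PySem.List.pyRange 0 (lem.length : Int) 1) = pvRef first tail lem 0
      have hfold := PySem.List.foldl_append_if
        (fun s => decide (contiguous_prefix_match_length_py (first :: tail) lem s > 0))
        (fun s => (s, contiguous_prefix_match_length_py (first :: tail) lem s))
        (PySem.List.pyRange 0 (lem.length : Int) 1) []
      simp only [decide_eq_true_eq] at hfold
      rw [hfold, List.nil_append]
      have := a_eq_ref first tail lem lem 0 (by simp)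
      simpa using this
    have hB : collect_fragment_matches_py_alt (first :: tail) lem = pvRef first tail lem 0 := by
      unfold collect_fragment_matches_py_alt
      rw [if_neg (List.cons_ne_nil first tail)]
      show List.foldl
          (fun acc i =>
            if (pvZArray ((first :: tail).map some ++ [none] ++ lem.map some))[(first :: tail).length + 1 + i]! > 0 then
              acc ++ [((i : Int), ((pvZArray ((first :: tail).map some ++ [none] ++ lem.map some))[(first :: tail).length + 1 + i]! : Int))]
            else acc)
          [] (List.range lem.length) = pvRef first tail lem 0
      have hfold := PySem.List.foldl_append_if
        (fun i : Nat => decide ((pvZArray ((first :: tail).map some ++ [none] ++ lem.map some))[(first :: tail).length + 1 + i]! > 0))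
        (fun i : Nat => ((i : Int), ((pvZArray ((first :: tail).map some ++ [none] ++ lem.map some))[(first :: tail).length + 1 + i]! : Int)))
        (List.range lem.length) []
      simp only [decide_eq_true_eq] at hfold
      rw [hfold, List.nil_append]
      rw [List.range_eq_range']
      have := b_eq_ref first tail lem lem 0 (by simp)
      simpa using this
    rw [hA, hB]
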